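-- pv_equiv track=rewrite | github.com/EIMI-Institute/CeFloPS | simulation/common/functions.py | pick_color
-- ===== SOURCE A (Python) =====
-- def pick_color(index):
--     kelly_colors = dict(
--         vivid_yellow=[255, 179, 0],
--         strong_purple=[128, 62, 117],
--         vivid_orange=[255, 104, 0],
--         very_light_blue=[166, 189, 215],
--         vivid_red=[193, 0, 32],
--         grayish_yellow=[206, 162, 98],
--         medium_gray=[129, 112, 102],
--         # these aren't good for people with defective color vision:
--         vivid_green=[0, 125, 52],
--         strong_purplish_pink=[246, 118, 142],
--         strong_blue=[0, 83, 138],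
--         strong_yellowish_pink=[255, 122, 92],
--         strong_violet=[83, 55, 122],
--         vivid_orange_yellow=[255, 142, 0],
--         strong_purplish_red=[179, 40, 81],
--         vivid_greenish_yellow=[244, 200, 0],
--         strong_reddish_brown=[127, 24, 13],
--         vivid_yellowish_green=[147, 170, 0],
--         deep_yellowish_brown=[89, 51, 21],
--         vivid_reddish_orange=[241, 58, 19],
--         dark_olive_green=[35, 44, 22],
--     )
--     for i, key in enumerate(kelly_colors):
--         if i == index % 20:
--             return kelly_colors[key]
-- ===== SOURCE B (Python) =====
-- def pick_color(index):
--     colors = [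
--         [255, 179, 0], [128, 62, 117], [255, 104, 0], [166, 189, 215],
--         [193, 0, 32], [206, 162, 98], [129, 112, 102], [0, 125, 52],
--         [246, 118, 142], [0, 83, 138], [255, 122, 92], [83, 55, 122],
--         [255, 142, 0], [179, 40, 81], [244, 200, 0], [127, 24, 13],
--         [147, 170, 0], [89, 51, 21], [241, 58, 19], [35, 44, 22],
--     ]
--     return colors[index % 20]
-- ===== Notes on version B (the rewrite author's own statement) =====
-- stated objective: simpler
-- what changed: Replace the dict plus enumerate scan that searches for the (index % 20)-th key with a plain positional list of the 20 RGB triples indexed directly by index % 20.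
import Mathlib
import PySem

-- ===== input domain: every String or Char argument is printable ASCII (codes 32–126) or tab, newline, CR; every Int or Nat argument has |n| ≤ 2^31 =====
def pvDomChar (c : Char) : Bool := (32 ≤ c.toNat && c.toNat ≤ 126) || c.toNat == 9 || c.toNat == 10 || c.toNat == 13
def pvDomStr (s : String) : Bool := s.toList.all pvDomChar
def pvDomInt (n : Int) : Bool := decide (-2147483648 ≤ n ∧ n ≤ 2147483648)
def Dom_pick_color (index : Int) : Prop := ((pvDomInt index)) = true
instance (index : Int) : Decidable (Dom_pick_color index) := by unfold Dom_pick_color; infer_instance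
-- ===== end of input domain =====

-- B replaces A's dict + enumerate scan for the (index % 20)-th key with direct positional indexing into a list of the 20 RGB triples (simpler; same values, same order).


-- ===== PORT A =====
-- the kelly_colors dict, built in insertion order as in A
def pickA_dict : PySem.Dict String (List Int) :=
  PySem.Dict.ofList [
    ("vivid_yellow", [255, 179, 0]), ("strong_purple", [128, 62, 117]),
    ("vivid_orange", [255, 104, 0]), ("very_light_blue", [166, 189, 215]),
    ("vivid_red", [193, 0, 32]), ("grayish_yellow", [206, 162, 98]),
    ("medium_gray", [129, 112, 102]), ("vivid_green", [0, 125, 52]),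
    ("strong_purplish_pink", [246, 118, 142]), ("strong_blue", [0, 83, 138]),
    ("strong_yellowish_pink", [255, 122, 92]), ("strong_violet", [83, 55, 122]),
    ("vivid_orange_yellow", [255, 142, 0]), ("strong_purplish_red", [179, 40, 81]),
    ("vivid_greenish_yellow", [244, 200, 0]), ("strong_reddish_brown", [127, 24, 13]),
    ("vivid_yellowish_green", [147, 170, 0]), ("deep_yellowish_brown", [89, 51, 21]),
    ("vivid_reddish_orange", [241, 58, 19]), ("dark_olive_green", [35, 44, 22])]

-- the 'for i, key in enumerate(kelly_colors): if i == index % 20: return kelly_colors[key]' loop;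
-- the [] at the end is unreachable (index % 20 always hits one of the 20 keys; Python would return None)
def pickA_loop (d : PySem.Dict String (List Int)) (r : Int) : Nat → List String → List Int
  | _, [] => []
  | i, key :: rest =>
    if (i : Int) = r then (d.get? key).getD [] else pickA_loop d r (i + 1) rest

def pick_color (index : Int) : List Int :=
  pickA_loop pickA_dict (PySem.Int.mod index 20) 0 pickA_dict.keys

-- ===== PORT B =====
def pickB_colors : List (List Int) :=
  [[255, 179, 0], [128, 62, 117], [255, 104, 0], [166, 189, 215],
   [193, 0, 32], [206, 162, 98], [129, 112, 102], [0, 125, 52],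
   [246, 118, 142], [0, 83, 138], [255, 122, 92], [83, 55, 122],
   [255, 142, 0], [179, 40, 81], [244, 200, 0], [127, 24, 13],
   [147, 170, 0], [89, 51, 21], [241, 58, 19], [35, 44, 22]]

-- colors[index % 20]; the getD default is unreachable (0 ≤ index % 20 < 20 = length)
def pick_color_alt (index : Int) : List Int :=
  (PySem.List.pyGet? pickB_colors (PySem.Int.mod index 20)).getD []

-- ===== PRECONDITION & SPEC =====
def Spec_pick_color (index : Int) (out : List Int) : Prop := out = pick_color_alt index
instance (index : Int) (out : List Int) : Decidable (Spec_pick_color index out) := by unfold Spec_pick_color; infer_instance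

-- ===== CLAIM (what is proved, stated in full; the proofs are below) =====
def Claim_equal_pick_color : Prop := ∀ (index : Int), Dom_pick_color index → Spec_pick_color index (pick_color index)

-- ===== LEMMAS AND PROOFS =====
theorem pick_agree (r : Int) (h0 : 0 ≤ r) (h1 : r < 20) :
    pickA_loop pickA_dict r 0 pickA_dict.keys =
    (PySem.List.pyGet? pickB_colors r).getD [] := by
  interval_cases r <;> decide

-- ===== VERDICT (by name: the statement is the Claim_ definition above) =====
theorem pick_color_spec : Claim_equal_pick_color := by
  intro index _
  unfold Spec_pick_color pick_color pick_color_alt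
  exact pick_agree _ (PySem.Int.mod_nonneg index (by norm_num))
    (PySem.Int.mod_lt index (by norm_num))
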